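-- pv_equiv track=rewrite | github.com/JDMM-Codemeister/PrimerBuilder | main.py | are_GC_repeats_good
-- ===== SOURCE A (Python) =====
-- def are_GC_repeats_good(primer: str) -> bool:
--     """Return true if less than 5 GC repeats"""
--     repeats = 0
--
--     #loop through primer and count repeats
--     for i in range(len(primer) - 1):
--         if primer[i] in ('G', 'C') and primer[i + 1] in ('C', 'G'):
--             repeats += 1
--
--     if repeats <= 5:
--         return True
--     else:
--         return False
-- ===== SOURCE B (Python) =====
-- def are_GC_repeats_good(primer: str) -> bool:
--     """Return true if less than 5 GC repeats (run-length decomposition)."""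
--     total = 0
--     run = 0
--     for c in primer:
--         if c in 'GC':
--             run += 1
--         else:
--             if run > 1:
--                 total += run - 1
--             run = 0
--     if run > 1:
--         total += run - 1
--     return total <= 5
-- ===== Notes on version B (the rewrite author's own statement) =====
-- stated objective: alternative
-- what changed: Replaced the indexed pairwise scan (primer[i], primer[i+1] over range(len-1)) by a run-length pass that tracks the current run of G/C characters and adds run-1 pairs at each run end.
import Mathlib
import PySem

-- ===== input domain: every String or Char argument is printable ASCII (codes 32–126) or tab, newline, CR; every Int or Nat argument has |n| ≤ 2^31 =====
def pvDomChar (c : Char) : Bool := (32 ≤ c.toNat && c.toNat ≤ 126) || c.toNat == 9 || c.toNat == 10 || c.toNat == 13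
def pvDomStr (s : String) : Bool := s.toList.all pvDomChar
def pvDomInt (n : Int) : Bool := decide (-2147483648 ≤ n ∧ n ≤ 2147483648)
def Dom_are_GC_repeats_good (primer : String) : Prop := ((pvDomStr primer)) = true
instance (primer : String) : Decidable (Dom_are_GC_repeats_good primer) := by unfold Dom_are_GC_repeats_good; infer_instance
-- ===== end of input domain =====

-- B replaces A's indexed pairwise scan with a run-length pass over the characters (alternative decomposition, same cost).


-- ===== PORT A =====
-- primer[i] / primer[i+1]: every index drawn from range(len-1) is in range, so pyGetD with a
-- default is exact here (the default is never returned).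
def are_GC_repeats_good (primer : String) : Bool :=
  let l := primer.toList
  let repeats : Int :=
    (PySem.List.pyRange 0 ((l.length : Int) - 1) 1).foldl
      (fun repeats i =>
        if (PySem.List.pyGetD l i 'A' == 'G' || PySem.List.pyGetD l i 'A' == 'C')
            && (PySem.List.pyGetD l (i + 1) 'A' == 'C' || PySem.List.pyGetD l (i + 1) 'A' == 'G')
        then repeats + 1 else repeats) 0
  if repeats ≤ 5 then true else false

-- ===== PORT B =====
-- c in 'GC'
def pvIsGC (c : Char) : Bool := c == 'G' || c == 'C'

def are_GC_repeats_good_alt (primer : String) : Bool :=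
  let p : Nat × Nat :=
    primer.toList.foldl
      (fun (st : Nat × Nat) c =>
        if pvIsGC c then (st.1, st.2 + 1)
        else (st.1 + (if st.2 > 1 then st.2 - 1 else 0), 0)) (0, 0)
  let total := p.1 + (if p.2 > 1 then p.2 - 1 else 0)
  decide (total ≤ 5)

-- ===== PRECONDITION & SPEC =====
def Spec_are_GC_repeats_good (primer : String) (out : Bool) : Prop := out = are_GC_repeats_good_alt primer
instance (primer : String) (out : Bool) : Decidable (Spec_are_GC_repeats_good primer out) := by unfold Spec_are_GC_repeats_good; infer_instance

-- ===== CLAIM (what is proved, stated in full; the proofs are below) =====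
def Claim_equal_are_GC_repeats_good : Prop := ∀ (primer : String), Dom_are_GC_repeats_good primer → Spec_are_GC_repeats_good primer (are_GC_repeats_good primer)

-- ===== LEMMAS AND PROOFS =====

-- number of adjacent positions where both characters are G/C
def pvPairCount : List Char → Nat
  | a :: b :: t => (if pvIsGC a && pvIsGC b then 1 else 0) + pvPairCount (b :: t)
  | _ => 0

-- pair count of l continuing a pending G/C run of length `run`
def pvPC (run : Nat) : List Char → Nat
  | [] => 0
  | c :: t => if pvIsGC c then (if 1 ≤ run then 1 else 0) + pvPC (run + 1) t else pvPC 0 t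

def pvHeadGC : List Char → Bool
  | [] => false
  | c :: _ => pvIsGC c

theorem pvPC_eq (l : List Char) : ∀ run, pvPC run l = pvPairCount l + (if 1 ≤ run ∧ pvHeadGC l = true then 1 else 0) := by
  induction l with
  | nil => intro run; simp [pvPC, pvPairCount, pvHeadGC]
  | cons c t ih =>
    intro run
    simp only [pvPC]
    by_cases h : pvIsGC c = true
    · rw [if_pos h, ih (run + 1)]
      cases t with
      | nil => simp [pvPairCount, pvHeadGC, h]
      | cons b t' =>
        simp only [pvPairCount, pvHeadGC, h, Bool.true_and]
        by_cases hb : pvIsGC b = true <;> simp [hb] <;> split_ifs <;> omega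
    · rw [if_neg h, ih 0]
      cases t with
      | nil => simp [pvPairCount, pvHeadGC, h]
      | cons b t' => simp [pvPairCount, pvHeadGC, h]

-- counting foldl over any list with an Int accumulator
theorem pv_foldl_count {α : Type} (P : α → Bool) (xs : List α) : ∀ (acc : Int),
    xs.foldl (fun a x => if P x then a + 1 else a) acc = acc + (xs.countP P : Int) := by
  induction xs with
  | nil => intro acc; simp
  | cons x t ih =>
    intro acc
    by_cases h : P x = true <;> simp [List.countP_cons, h, ih] <;> push_cast <;> ring

-- A's index-pair count equals pvPairCount
theorem pv_cntA_eq (l : List Char) :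
    (List.range (l.length - 1)).countP
        (fun k => (l.getD k 'A' == 'G' || l.getD k 'A' == 'C')
          && (l.getD (k + 1) 'A' == 'C' || l.getD (k + 1) 'A' == 'G')) = pvPairCount l := by
  induction l with
  | nil => simp [pvPairCount]
  | cons x t ih =>
    cases t with
    | nil => simp [pvPairCount]
    | cons y t' =>
      have hlen : (x :: y :: t').length - 1 = (y :: t').length - 1 + 1 := by simp
      rw [hlen, List.range_succ_eq_map, List.countP_cons, List.countP_map]
      have h2 : ((List.range ((y :: t').length - 1)).countP
          (((fun k => ((x :: y :: t').getD k 'A' == 'G' || (x :: y :: t').getD k 'A' == 'C')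
            && ((x :: y :: t').getD (k + 1) 'A' == 'C' || (x :: y :: t').getD (k + 1) 'A' == 'G')) ∘ Nat.succ)))
          = pvPairCount (y :: t') := by
        rw [← ih]
        apply List.countP_congr
        intro k _
        simp [Function.comp, List.getD_cons_succ, Nat.succ_eq_add_one]
      rw [h2]
      simp only [pvPairCount, pvIsGC, List.getD_cons_zero, List.getD_cons_succ]
      by_cases hx : (x == 'G' || x == 'C') = true <;>
        by_cases hy : (y == 'G') = true <;>
        by_cases hy2 : (y == 'C') = true <;>
        simp [hx, hy, hy2] <;> omega

-- B's fold invariant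
theorem pv_fold_inv (l : List Char) : ∀ (tot run : Nat),
    (l.foldl (fun (st : Nat × Nat) c =>
        if pvIsGC c then (st.1, st.2 + 1)
        else (st.1 + (if st.2 > 1 then st.2 - 1 else 0), 0)) (tot, run)).1
      + ((l.foldl (fun (st : Nat × Nat) c =>
        if pvIsGC c then (st.1, st.2 + 1)
        else (st.1 + (if st.2 > 1 then st.2 - 1 else 0), 0)) (tot, run)).2 - 1)
    = tot + (run - 1) + pvPC run l := by
  induction l with
  | nil => intro tot run; simp [pvPC]
  | cons c t ih =>
    intro tot run
    by_cases h : pvIsGC c = true <;>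
      simp only [List.foldl_cons, h, if_true, if_false, Bool.false_eq_true, ite_true, ite_false, pvPC] <;>
      rw [ih] <;> split_ifs <;> omega

theorem pv_alt_eq (primer : String) :
    are_GC_repeats_good_alt primer = decide (pvPairCount primer.toList ≤ 5) := by
  unfold are_GC_repeats_good_alt
  have h := pv_fold_inv primer.toList 0 0
  have hpc := pvPC_eq primer.toList 0
  simp only []
  congr 1
  have hif : (if (primer.toList.foldl (fun (st : Nat × Nat) c =>
        if pvIsGC c then (st.1, st.2 + 1)
        else (st.1 + (if st.2 > 1 then st.2 - 1 else 0), 0)) (0, 0)).2 > 1 then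
        (primer.toList.foldl (fun (st : Nat × Nat) c =>
        if pvIsGC c then (st.1, st.2 + 1)
        else (st.1 + (if st.2 > 1 then st.2 - 1 else 0), 0)) (0, 0)).2 - 1 else 0)
      = ((primer.toList.foldl (fun (st : Nat × Nat) c =>
        if pvIsGC c then (st.1, st.2 + 1)
        else (st.1 + (if st.2 > 1 then st.2 - 1 else 0), 0)) (0, 0)).2 - 1) := by
    split <;> omega
  rw [hif, h]
  simp [hpc]

theorem pv_a_eq (primer : String) :
    are_GC_repeats_good primer = decide (pvPairCount primer.toList ≤ 5) := by
  unfold are_GC_repeats_good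
  simp only [PySem.List.pyRange_one]
  have htn : (((primer.toList.length : Int) - 1) - 0).toNat = primer.toList.length - 1 := by omega
  rw [List.foldl_map]
  rw [pv_foldl_count (fun (k : Nat) =>
      (PySem.List.pyGetD primer.toList (0 + (k : Int)) 'A' == 'G' || PySem.List.pyGetD primer.toList (0 + (k : Int)) 'A' == 'C')
        && (PySem.List.pyGetD primer.toList (0 + (k : Int) + 1) 'A' == 'C' || PySem.List.pyGetD primer.toList (0 + (k : Int) + 1) 'A' == 'G'))]
  rw [htn]
  have h2 : ((List.range (primer.toList.length - 1)).countP
      (fun (k : Nat) =>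
      (PySem.List.pyGetD primer.toList (0 + (k : Int)) 'A' == 'G' || PySem.List.pyGetD primer.toList (0 + (k : Int)) 'A' == 'C')
        && (PySem.List.pyGetD primer.toList (0 + (k : Int) + 1) 'A' == 'C' || PySem.List.pyGetD primer.toList (0 + (k : Int) + 1) 'A' == 'G')))
      = pvPairCount primer.toList := by
    rw [← pv_cntA_eq primer.toList]
    apply List.countP_congr
    intro k _
    have hc : ((k : Nat) : Int) + 1 = ((k + 1 : Nat) : Int) := by push_cast; ring
    simp only [zero_add, hc, PySem.List.pyGetD_natCast]
  rw [h2]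
  by_cases hle : pvPairCount primer.toList ≤ 5
  · have h5 : (0 : Int) + (pvPairCount primer.toList : Int) ≤ 5 := by push_cast; omega
    simp [h5, hle]
  · have h5 : ¬ ((0 : Int) + (pvPairCount primer.toList : Int) ≤ 5) := by push_cast; omega
    simp [h5, hle]

-- ===== VERDICT (by name: the statement is the Claim_ definition above) =====
theorem are_GC_repeats_good_spec : Claim_equal_are_GC_repeats_good := by
  intro primer _
  unfold Spec_are_GC_repeats_good
  rw [pv_a_eq, pv_alt_eq]
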